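-- pv_equiv track=rewrite | github.com/stanislavstoyanov99/Smith-Waterman-Parallel--CourseWork | align.py | alignment_string
-- ===== SOURCE A (Python) =====
-- def alignment_string(aligned_seq1, aligned_seq2):
--
--     # Sets initial values
--     idents, gaps, mismatches = 5, -4, -3
--     alignment_string = []
--
--     # Runs through both strings
--     for base1, base2 in zip(aligned_seq1, aligned_seq2):
--
--         # Checks for match
--         if base1 == base2:
--             alignment_string.append('|')
--             idents += 1
--
--         # Checks for insertion/deletion
--         elif '-' in (base1, base2):
--             alignment_string.append(' ')
--             gaps += 1
--
--         # If neither of the above, it's mismatch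
--         else:
--             alignment_string.append(':')
--             mismatches += 1
--
--     # Returns the "alignment" string and the alignment characteristics
--     return ''.join(alignment_string), idents, gaps, mismatches
-- ===== SOURCE B (Python) =====
-- def alignment_string(aligned_seq1, aligned_seq2):
--     # Layered painting: start with all-mismatch markers, paint gap positions,
--     # then paint match positions on top; counts by inclusion-exclusion arithmetic.
--     pairs = list(zip(aligned_seq1, aligned_seq2))
--     n = len(pairs)
--     marks = [':'] * n
--     for i in range(n):
--         if pairs[i][0] == '-' or pairs[i][1] == '-':
--             marks[i] = ' '
--     for i in range(n):
--         if pairs[i][0] == pairs[i][1]: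
--             marks[i] = '|'
--     matches = sum(1 for a, b in pairs if a == b)
--     dash_any = sum(1 for a, b in pairs if a == '-' or b == '-')
--     dash_both = sum(1 for a, b in pairs if a == '-' and b == '-')
--     gaps = dash_any - dash_both
--     return ''.join(marks), 5 + matches, -4 + gaps, -3 + (n - matches - gaps)
-- ===== Notes on version B (the rewrite author's own statement) =====
-- stated objective: alternative
-- what changed: Replaces A's single three-way-branching loop by layered painting (start with an all-':' marker array, overwrite gap positions with ' ', then overwrite match positions with '|') and derives the counts by inclusion-exclusion arithmetic (gaps = #dash-containing - #double-dash pairs, mismatches = n - matches - gaps) instead of per-branch counters; B never evaluates A's combined 'not equal and contains dash' branch.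
import Mathlib
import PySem

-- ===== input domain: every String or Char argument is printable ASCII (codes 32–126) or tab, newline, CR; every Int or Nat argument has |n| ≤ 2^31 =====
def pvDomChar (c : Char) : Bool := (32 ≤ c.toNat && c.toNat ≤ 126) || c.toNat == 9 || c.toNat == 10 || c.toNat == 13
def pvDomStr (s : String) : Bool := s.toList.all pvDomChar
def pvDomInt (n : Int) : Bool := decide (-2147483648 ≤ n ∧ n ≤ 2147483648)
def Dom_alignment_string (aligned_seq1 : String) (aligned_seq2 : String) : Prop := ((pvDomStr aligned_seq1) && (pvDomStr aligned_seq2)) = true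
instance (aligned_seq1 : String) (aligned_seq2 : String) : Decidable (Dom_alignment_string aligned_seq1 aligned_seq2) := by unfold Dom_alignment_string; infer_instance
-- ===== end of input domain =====

-- B replaces A's three-way-branching counting loop by layered painting of the marker
-- array (':' base, then ' ' at gap positions, then '|' at matches) with the counts
-- obtained by inclusion-exclusion arithmetic; an alternative decomposition, same cost.


-- ===== PORT A =====
-- the loop body: one step of A's for-loop over zipped base pairs
def alignStepA (st : List Char × Int × Int × Int) (p : Char × Char) : List Char × Int × Int × Int :=
  if p.1 == p.2 then (st.1 ++ ['|'], st.2.1 + 1, st.2.2.1, st.2.2.2)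
  else if p.1 == '-' || p.2 == '-' then (st.1 ++ [' '], st.2.1, st.2.2.1 + 1, st.2.2.2)
  else (st.1 ++ [':'], st.2.1, st.2.2.1, st.2.2.2 + 1)

def alignment_string (aligned_seq1 : String) (aligned_seq2 : String) : String × Int × Int × Int :=
  let r := (aligned_seq1.toList.zip aligned_seq2.toList).foldl alignStepA ([], 5, -4, -3)
  (String.ofList r.1, r.2.1, r.2.2.1, r.2.2.2)

-- ===== PORT B =====
-- one of B's painting loops: for i in range(n): if P(pairs[i]): marks[i] = c
def paintLoop (pairs : List (Char × Char)) (P : Char × Char → Bool) (c : Char)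
    (n : Nat) (marks : List Char) : List Char :=
  (List.range n).foldl (fun m i => if P (pairs.getD i (' ', ' ')) then m.set i c else m) marks

def alignment_string_alt (aligned_seq1 : String) (aligned_seq2 : String) : String × Int × Int × Int :=
  let pairs := aligned_seq1.toList.zip aligned_seq2.toList
  let n := pairs.length
  let marks0 := List.replicate n ':'
  let marks1 := paintLoop pairs (fun p => p.1 == '-' || p.2 == '-') ' ' n marks0
  let marks := paintLoop pairs (fun p => p.1 == p.2) '|' n marks1
  let matchCount : Int := pairs.countP (fun p => p.1 == p.2)
  let dash_any : Int := pairs.countP (fun p => p.1 == '-' || p.2 == '-')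
  let dash_both : Int := pairs.countP (fun p => p.1 == '-' && p.2 == '-')
  let gaps : Int := dash_any - dash_both
  (String.ofList marks, 5 + matchCount, -4 + gaps, -3 + ((n : Int) - matchCount - gaps))

-- ===== PRECONDITION & SPEC =====
def Spec_alignment_string (aligned_seq1 : String) (aligned_seq2 : String) (out : String × Int × Int × Int) : Prop := out = alignment_string_alt aligned_seq1 aligned_seq2
instance (aligned_seq1 : String) (aligned_seq2 : String) (out : String × Int × Int × Int) : Decidable (Spec_alignment_string aligned_seq1 aligned_seq2 out) := by unfold Spec_alignment_string; infer_instance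

-- ===== CLAIM (what is proved, stated in full; the proofs are below) =====
def Claim_equal_alignment_string : Prop := ∀ (aligned_seq1 : String) (aligned_seq2 : String), Dom_alignment_string aligned_seq1 aligned_seq2 → Spec_alignment_string aligned_seq1 aligned_seq2 (alignment_string aligned_seq1 aligned_seq2)

-- ===== LEMMAS AND PROOFS =====

-- the marker A's branch order assigns to a pair
def alignMarker (p : Char × Char) : Char :=
  if p.1 == p.2 then '|' else if p.1 == '-' || p.2 == '-' then ' ' else ':'

-- A's fold equals the canonical form: markers by map, counters as branch counts
theorem foldA_invariant (zs : List (Char × Char)) (cs : List Char) (i g m : Int) :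
    zs.foldl alignStepA (cs, i, g, m) =
      (cs ++ zs.map alignMarker,
       i + (zs.countP (fun p => p.1 == p.2) : Int),
       g + (zs.countP (fun p => !(p.1 == p.2) && (p.1 == '-' || p.2 == '-')) : Int),
       m + (zs.countP (fun p => !(p.1 == p.2) && !(p.1 == '-' || p.2 == '-')) : Int)) := by
  induction zs generalizing cs i g m with
  | nil => simp
  | cons p t ih =>
    simp only [List.foldl_cons, List.map_cons, List.countP_cons, alignStepA, alignMarker]
    by_cases h1 : p.1 == p.2
    · rw [if_pos h1, ih]
      simp [h1]
      all_goals omega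
    · rw [if_neg h1]
      by_cases h2 : p.1 == '-' || p.2 == '-'
      · rw [if_pos h2, ih]
        simp [h1, h2]
        all_goals omega
      · rw [if_neg h2, ih]
        simp [h1, h2]
        all_goals omega

-- painting preserves length
theorem paintLoop_length (pairs : List (Char × Char)) (P : Char × Char → Bool) (c : Char)
    (n : Nat) (marks : List Char) : (paintLoop pairs P c n marks).length = marks.length := by
  unfold paintLoop
  induction n with
  | zero => rfl
  | succ k ih =>
    rw [List.range_succ, List.foldl_append]
    simp only [List.foldl_cons, List.foldl_nil]
    split_ifs
    · rw [List.length_set]; exact ih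
    · exact ih

-- pointwise effect of one painting loop
theorem paintLoop_getElem? (pairs : List (Char × Char)) (P : Char × Char → Bool) (c : Char)
    (n : Nat) (marks : List Char) (hn : n ≤ marks.length) (j : Nat) :
    (paintLoop pairs P c n marks)[j]? =
      if j < n ∧ P (pairs.getD j (' ', ' ')) then some c else marks[j]? := by
  induction n with
  | zero => simp [paintLoop]
  | succ k ih =>
    have hk : k ≤ marks.length := Nat.le_of_succ_le hn
    have ihk := ih hk
    have hlen : (paintLoop pairs P c k marks).length = marks.length :=
      paintLoop_length pairs P c k marks
    have hstep : paintLoop pairs P c (k + 1) marks =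
        if P (pairs.getD k (' ', ' ')) then (paintLoop pairs P c k marks).set k c
        else paintLoop pairs P c k marks := by
      unfold paintLoop
      rw [List.range_succ, List.foldl_append]
      simp only [List.foldl_cons, List.foldl_nil]
    rw [hstep]
    by_cases hP : P (pairs.getD k (' ', ' ')) = true
    · rw [if_pos hP]
      by_cases hj : j = k
      · subst hj
        have hjlt : j < (paintLoop pairs P c j marks).length := by
          rw [hlen]; omega
        rw [List.getElem?_set_self hjlt, if_pos ⟨Nat.lt_succ_self j, hP⟩]
      · rw [List.getElem?_set_ne (fun h => hj h.symm), ihk]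
        have hcond : (j < k ∧ P (pairs.getD j (' ', ' ')) = true) =
            (j < k + 1 ∧ P (pairs.getD j (' ', ' ')) = true) := by
          apply propext
          constructor
          · rintro ⟨h, hp⟩; exact ⟨Nat.lt_succ_of_lt h, hp⟩
          · rintro ⟨h, hp⟩; exact ⟨by omega, hp⟩
        simp only [hcond]
    · rw [if_neg hP, ihk]
      have hcond : (j < k ∧ P (pairs.getD j (' ', ' ')) = true) =
          (j < k + 1 ∧ P (pairs.getD j (' ', ' ')) = true) := by
        apply propext
        constructor
        · rintro ⟨h, hp⟩; exact ⟨Nat.lt_succ_of_lt h, hp⟩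
        · rintro ⟨h, hp⟩
          refine ⟨?_, hp⟩
          rcases Nat.lt_succ_iff_lt_or_eq.mp h with h' | h'
          · exact h'
          · subst h'; exact absurd hp hP
      simp only [hcond]

-- the two painting passes produce exactly the mapped markers
theorem paint_eq_map (pairs : List (Char × Char)) :
    paintLoop pairs (fun p => p.1 == p.2) '|' pairs.length
      (paintLoop pairs (fun p => p.1 == '-' || p.2 == '-') ' ' pairs.length
        (List.replicate pairs.length ':')) = pairs.map alignMarker := by
  have hl1 : (paintLoop pairs (fun p => p.1 == '-' || p.2 == '-') ' ' pairs.length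
      (List.replicate pairs.length ':')).length = pairs.length := by
    rw [paintLoop_length]; simp
  apply List.ext_getElem?
  intro j
  rw [paintLoop_getElem? _ _ _ _ _ (le_of_eq hl1.symm) j,
      paintLoop_getElem? _ _ _ _ _ (by simp) j, List.getElem?_map]
  by_cases hj : j < pairs.length
  · have hpair : pairs[j]? = some (pairs.getD j (' ', ' ')) := by
      rw [List.getD_eq_getElem?_getD, List.getElem?_eq_getElem hj]
      simp
    rw [hpair]
    have hrep : (List.replicate pairs.length ':')[j]? = some ':' := by
      simp [hj]
    rw [hrep]
    simp only [Option.map_some]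
    unfold alignMarker
    by_cases he : (pairs.getD j (' ', ' ')).1 == (pairs.getD j (' ', ' ')).2
    · rw [if_pos ⟨hj, he⟩, if_pos he]
    · rw [if_neg (fun h => he h.2), if_neg he]
      by_cases hd : (pairs.getD j (' ', ' ')).1 == '-' || (pairs.getD j (' ', ' ')).2 == '-'
      · rw [if_pos ⟨hj, hd⟩, if_pos hd]
      · rw [if_neg (fun h => hd h.2), if_neg hd]
  · have h1 : pairs[j]? = none := by rw [List.getElem?_eq_none]; omega
    have h2 : (List.replicate pairs.length ':')[j]? = (none : Option Char) := by
      rw [List.getElem?_eq_none]; simpa using Nat.le_of_not_lt hj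
    have h3 : ¬ (j < pairs.length ∧ ((pairs.getD j (' ', ' ')).1 == (pairs.getD j (' ', ' ')).2) = true) :=
      fun h => hj h.1
    have h4 : ¬ (j < pairs.length ∧ ((pairs.getD j (' ', ' ')).1 == '-' || (pairs.getD j (' ', ' ')).2 == '-') = true) :=
      fun h => hj h.1
    rw [if_neg h3, if_neg h4, h1, h2]
    rfl

-- inclusion-exclusion: gap count = dash-containing pairs minus double-dash pairs
theorem gaps_arith (zs : List (Char × Char)) :
    (zs.countP (fun p => !(p.1 == p.2) && (p.1 == '-' || p.2 == '-')) : Int) =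
      (zs.countP (fun p => p.1 == '-' || p.2 == '-') : Int)
        - (zs.countP (fun p => p.1 == '-' && p.2 == '-') : Int) := by
  induction zs with
  | nil => simp
  | cons p t ih =>
    obtain ⟨a, b⟩ := p
    simp only [List.countP_cons]
    push_cast
    rw [ih]
    by_cases he : a = b
    · subst he
      by_cases h1 : a = '-' <;> simp [h1] <;> omega
    · by_cases h1 : a = '-' <;> by_cases h2 : b = '-'
      · exact absurd (h1.trans h2.symm) he
      · have h2' : ¬ ('-' : Char) = b := fun h => h2 h.symm
        simp [he, h1, h2, h2']
        omega
      · have h1' : ¬ ('-' : Char) = a := fun h => h1 h.symm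
        simp [he, h1, h2, h1']
        omega
      · simp [he, h1, h2]

-- the three branch counts partition the list
theorem counts_partition (zs : List (Char × Char)) :
    (zs.countP (fun p => !(p.1 == p.2) && !(p.1 == '-' || p.2 == '-')) : Int) =
      (zs.length : Int) - (zs.countP (fun p => p.1 == p.2) : Int)
        - (zs.countP (fun p => !(p.1 == p.2) && (p.1 == '-' || p.2 == '-')) : Int) := by
  induction zs with
  | nil => simp
  | cons p t ih =>
    obtain ⟨a, b⟩ := p
    simp only [List.countP_cons, List.length_cons]
    push_cast
    rw [ih]
    by_cases he : a = b
    · subst he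
      simp
    · by_cases h1 : a = '-' <;> by_cases h2 : b = '-'
      · exact absurd (h1.trans h2.symm) he
      · have h2' : ¬ ('-' : Char) = b := fun h => h2 h.symm
        simp [he, h1, h2, h2']
        omega
      · have h1' : ¬ ('-' : Char) = a := fun h => h1 h.symm
        simp [he, h1, h2, h1']
        omega
      · simp [he, h1, h2]
        omega

theorem alignment_string_eq (s1 s2 : String) :
    alignment_string s1 s2 = alignment_string_alt s1 s2 := by
  unfold alignment_string alignment_string_alt
  rw [foldA_invariant]
  simp only [List.nil_append]
  rw [paint_eq_map]
  have hg := gaps_arith (s1.toList.zip s2.toList)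
  have hp := counts_partition (s1.toList.zip s2.toList)
  refine Prod.ext rfl (Prod.ext ?_ (Prod.ext ?_ ?_)) <;> dsimp only <;> omega

-- ===== VERDICT (by name: the statement is the Claim_ definition above) =====
theorem alignment_string_spec : Claim_equal_alignment_string := by
  intro s1 s2 _
  unfold Spec_alignment_string
  exact alignment_string_eq s1 s2
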